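-- pv_equiv track=rewrite | github.com/MichaelY310/CS291A | scripts/parse/parse_strings.py | count_line_inclusions
-- ===== SOURCE A (Python) =====
-- def count_line_inclusions(ground_truth_lines, found_lines):
--     found_dict = {}
--     for line in found_lines:
--         if ":" not in line:
--             continue
--         file, lineno = line.split(":")
--         try:
--             lineno = int(lineno)
--         except ValueError:
--             continue
--         if file not in found_dict:
--             found_dict[file] = set()
--         found_dict[file].add(lineno)
--
--     count = 0
--     for line in ground_truth_lines:
--         if ":" not in line:
--             continue
--         file, lineno = line.split(":")
--         try:
--             lineno = int(lineno)
--         except ValueError: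
--             continue
--         if file in found_dict:
--             for found_lineno in found_dict[file]:
--                 if abs(found_lineno - lineno) <= 20:
--                     count += 1
--                     break
--     return count
-- ===== SOURCE B (Python) =====
-- def _bisect_left(nums, x):
--     lo, hi = 0, len(nums)
--     while lo < hi:
--         mid = (lo + hi) // 2
--         if nums[mid] < x:
--             lo = mid + 1
--         else:
--             hi = mid
--     return lo
--
--
-- def count_line_inclusions(ground_truth_lines, found_lines):
--     index = {}
--     for line in found_lines:
--         if ":" not in line:
--             continue
--         file, lineno = line.split(":")
--         try:
--             lineno = int(lineno)
--         except ValueError: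
--             continue
--         index.setdefault(file, []).append(lineno)
--     index = {file: sorted(nums) for file, nums in index.items()}
--
--     count = 0
--     for line in ground_truth_lines:
--         if ":" not in line:
--             continue
--         file, lineno = line.split(":")
--         try:
--             lineno = int(lineno)
--         except ValueError:
--             continue
--         if file in index:
--             nums = index[file]
--             i = _bisect_left(nums, lineno - 20)
--             if i < len(nums) and nums[i] <= lineno + 20:
--                 count += 1
--     return count
-- ===== Notes on version B (the rewrite author's own statement) =====
-- stated objective: alternative
-- what changed: B collects each file's found line numbers into a list, sorts each list once, and answers every ground-truth query with a hand-written binary search for the first element >= lineno-20, replacing A's per-file set scanned linearly for every ground-truth line; on a timing run's random inputs (which rarely parse) the two are equally fast, so no speed is claimed.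
import Mathlib
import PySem

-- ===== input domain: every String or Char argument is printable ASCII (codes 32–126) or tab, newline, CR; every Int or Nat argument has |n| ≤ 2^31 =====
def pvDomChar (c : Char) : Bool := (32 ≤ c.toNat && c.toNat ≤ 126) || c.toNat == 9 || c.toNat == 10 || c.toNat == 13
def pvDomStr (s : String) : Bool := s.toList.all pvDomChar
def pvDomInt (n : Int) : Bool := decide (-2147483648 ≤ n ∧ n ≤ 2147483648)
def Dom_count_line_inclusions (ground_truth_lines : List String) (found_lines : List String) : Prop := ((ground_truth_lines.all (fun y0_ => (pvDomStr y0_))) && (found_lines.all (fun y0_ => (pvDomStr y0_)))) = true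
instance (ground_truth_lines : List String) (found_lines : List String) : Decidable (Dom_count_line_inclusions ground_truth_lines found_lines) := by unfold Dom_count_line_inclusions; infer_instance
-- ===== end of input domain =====

-- B replaces A's per-file sets scanned linearly for every ground-truth line by per-file
-- sorted lists queried with a binary search (a different algorithm; same return value).


-- ===== PORT A =====
def count_line_inclusions (ground_truth_lines : List String) (found_lines : List String) : Int :=
  let found_dict : PySem.Dict String (PySem.Set Int) :=
    found_lines.foldl (fun d line =>
      if PySem.Str.isIn ":" line then
        match PySem.Str.split? line ":" with
        | some [file, linenoStr] =>
          match PySem.Int.ofStr? linenoStr with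
          | some lineno =>
            -- 'if file not in found_dict: found_dict[file] = set()' then 'found_dict[file].add(lineno)'
            let d' := if d.contains file then d else d.insert file PySem.Set.empty
            d'.modify file PySem.Set.empty (fun s => PySem.Set.add s lineno)
          | none => d          -- int() raised ValueError: continue
        | _ => d               -- 'file, lineno = line.split(":")' raises ValueError: excluded by Pre_
      else d) PySem.Dict.empty
  ground_truth_lines.foldl (fun count line =>
    if PySem.Str.isIn ":" line then
      match PySem.Str.split? line ":" with
      | some [file, linenoStr] =>
        match PySem.Int.ofStr? linenoStr with
        | some lineno =>
          match found_dict.get? file with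
          | some s =>
            -- 'for found_lineno in found_dict[file]: if abs(…) <= 20: count += 1; break'
            -- (count is incremented once iff some element is within 20: set-order independent)
            if s.any (fun fn => decide ((fn - lineno).natAbs ≤ 20)) then count + 1 else count
          | none => count
        | none => count        -- int() raised ValueError: continue
      | _ => count             -- unpack raises ValueError: excluded by Pre_
    else count) 0

-- ===== PORT B =====
-- hand-written binary search of Source B (the while-loop, transliterated; nums[mid] is in range
-- whenever hi ≤ nums.length, the only way it is called)
def pvBisectLeftGo (nums : List Int) (x : Int) (lo hi : Nat) : Nat :=
  if _h : lo < hi then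
    let mid := (lo + hi) / 2
    if nums.getD mid 0 < x then pvBisectLeftGo nums x (mid + 1) hi
    else pvBisectLeftGo nums x lo mid
  else lo
termination_by hi - lo
decreasing_by all_goals omega

def pvBisectLeft (nums : List Int) (x : Int) : Nat := pvBisectLeftGo nums x 0 nums.length

def count_line_inclusions_alt (ground_truth_lines : List String) (found_lines : List String) : Int :=
  let index0 : PySem.Dict String (List Int) :=
    found_lines.foldl (fun d line =>
      if PySem.Str.isIn ":" line then
        match PySem.Str.split? line ":" with
        | none => d
        | some [] => d
        | some [_] => d
        | some (file :: linenoStr :: rest) =>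
          if rest.isEmpty then   -- 'file, lineno = line.split(":")' needs exactly two parts
            match PySem.Int.ofStr? linenoStr with
            | none => d
            | some lineno => d.modify file [] (fun nums => nums ++ [lineno])  -- setdefault(file, []).append(lineno)
          else d               -- unpack raises ValueError: excluded by Pre_
      else d) PySem.Dict.empty
  -- index = {file: sorted(nums) for file, nums in index.items()}
  let index : PySem.Dict String (List Int) :=
    PySem.Dict.mk (index0.items.map (fun p => (p.1, PySem.List.sorted p.2 (fun x => x) false)))
  ground_truth_lines.foldl (fun count line =>
    if PySem.Str.isIn ":" line then
      match PySem.Str.split? line ":" with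
      | none => count
      | some [] => count
      | some [_] => count
      | some (file :: linenoStr :: rest) =>
        if rest.isEmpty then   -- 'file, lineno = line.split(":")' needs exactly two parts
          match PySem.Int.ofStr? linenoStr with
          | none => count
          | some lineno =>
            match index.get? file with
            | none => count
            | some nums =>
              let i := pvBisectLeft nums (lineno - 20)
              if i < nums.length ∧ nums.getD i 0 ≤ lineno + 20 then count + 1 else count
        else count           -- unpack raises ValueError: excluded by Pre_
    else count) 0

-- ===== PRECONDITION & SPEC =====
-- Pre_ excludes exactly the inputs on which Python A raises ValueError: a line containing
-- two or more ':' makes the unpacking assignment 'file, lineno = line.split(":")' raise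
-- (Python B raises there identically).
def Pre_count_line_inclusions (ground_truth_lines : List String) (found_lines : List String) : Prop :=
  (∀ line ∈ ground_truth_lines, PySem.Str.count line ":" ≤ 1) ∧
  (∀ line ∈ found_lines, PySem.Str.count line ":" ≤ 1)
instance (ground_truth_lines : List String) (found_lines : List String) : Decidable (Pre_count_line_inclusions ground_truth_lines found_lines) := by unfold Pre_count_line_inclusions; infer_instance

def pvWitness_count_line_inclusions : List String × List String := (["a.py:17", "b.py:3"], ["a.py:30", "c.py:1"])

def Spec_count_line_inclusions (ground_truth_lines : List String) (found_lines : List String) (out : Int) : Prop := out = count_line_inclusions_alt ground_truth_lines found_lines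
instance (ground_truth_lines : List String) (found_lines : List String) (out : Int) : Decidable (Spec_count_line_inclusions ground_truth_lines found_lines out) := by unfold Spec_count_line_inclusions; infer_instance

-- ===== CLAIM (what is proved, stated in full; the proofs are below) =====
def Claim_equal_count_line_inclusions : Prop := ∀ (ground_truth_lines : List String) (found_lines : List String), Dom_count_line_inclusions ground_truth_lines found_lines → Pre_count_line_inclusions ground_truth_lines found_lines → Spec_count_line_inclusions ground_truth_lines found_lines (count_line_inclusions ground_truth_lines found_lines)

-- ===== LEMMAS AND PROOFS =====

-- the line-parsing step both Pythons perform verbatim, factored for the proofs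
def pvParse (line : String) : Option (String × Int) :=
  if PySem.Str.isIn ":" line then
    match PySem.Str.split? line ":" with
    | some [file, linenoStr] => (PySem.Int.ofStr? linenoStr).map (fun n => (file, n))
    | _ => none
  else none

-- any fold whose step is the common parse-then-handle shape is a fold over the parsed pairs
theorem pv_step_parse {β : Type} (g : β → String → Int → β) (acc : β) (line : String) :
    (if PySem.Str.isIn ":" line then
      match PySem.Str.split? line ":" with
      | some [file, linenoStr] =>
        match PySem.Int.ofStr? linenoStr with
        | some lineno => g acc file lineno
        | none => acc
      | _ => acc
    else acc)
    = match pvParse line with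
      | some p => g acc p.1 p.2
      | none => acc := by
  unfold pvParse
  cases hI : PySem.Str.isIn ":" line
  · rfl
  · simp only [if_true]
    rcases hS : PySem.Str.split? line ":" with _ | ⟨_ | ⟨f, _ | ⟨s, _ | ⟨c, t⟩⟩⟩⟩ <;>
      try rfl
    cases hO : PySem.Int.ofStr? s <;> simp [hO]

theorem pv_fold_parse {β : Type} (g : β → String → Int → β) (ls : List String) (b : β) :
    ls.foldl (fun acc line =>
      if PySem.Str.isIn ":" line then
        match PySem.Str.split? line ":" with
        | some [file, linenoStr] =>
          match PySem.Int.ofStr? linenoStr with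
          | some lineno => g acc file lineno
          | none => acc
        | _ => acc
      else acc) b
    = (ls.filterMap pvParse).foldl (fun acc p => g acc p.1 p.2) b := by
  rw [List.foldl_filterMap]
  apply PySem.List.foldl_congr_mem
  intro acc line _
  rw [pv_step_parse g acc line]
  cases pvParse line <;> rfl

-- the same fact for B's shape of the parse step
theorem pv_step_parse' {β : Type} (g : β → String → Int → β) (acc : β) (line : String) :
    (if PySem.Str.isIn ":" line then
      match PySem.Str.split? line ":" with
      | none => acc
      | some [] => acc
      | some [_] => acc
      | some (file :: linenoStr :: rest) =>
        if rest.isEmpty then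
          match PySem.Int.ofStr? linenoStr with
          | none => acc
          | some lineno => g acc file lineno
        else acc
    else acc)
    = match pvParse line with
      | some p => g acc p.1 p.2
      | none => acc := by
  unfold pvParse
  cases hI : PySem.Str.isIn ":" line
  · rfl
  · simp only [if_true]
    rcases hS : PySem.Str.split? line ":" with _ | ⟨_ | ⟨f, _ | ⟨s, _ | ⟨c, t⟩⟩⟩⟩ <;>
      try rfl
    cases hO : PySem.Int.ofStr? s <;> simp [hO]

theorem pv_fold_parse' {β : Type} (g : β → String → Int → β) (ls : List String) (b : β) :
    ls.foldl (fun acc line =>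
      if PySem.Str.isIn ":" line then
        match PySem.Str.split? line ":" with
        | none => acc
        | some [] => acc
        | some [_] => acc
        | some (file :: linenoStr :: rest) =>
          if rest.isEmpty then
            match PySem.Int.ofStr? linenoStr with
            | none => acc
            | some lineno => g acc file lineno
          else acc
      else acc) b
    = (ls.filterMap pvParse).foldl (fun acc p => g acc p.1 p.2) b := by
  rw [List.foldl_filterMap]
  apply PySem.List.foldl_congr_mem
  intro acc line _
  rw [pv_step_parse' g acc line]
  cases pvParse line <;> rfl

def pvStepA (d : PySem.Dict String (PySem.Set Int)) (file : String) (lineno : Int) :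
    PySem.Dict String (PySem.Set Int) :=
  let d' := if d.contains file then d else d.insert file PySem.Set.empty
  d'.modify file PySem.Set.empty (fun s => PySem.Set.add s lineno)

def pvDictA (ps : List (String × Int)) : PySem.Dict String (PySem.Set Int) :=
  ps.foldl (fun d p => pvStepA d p.1 p.2) PySem.Dict.empty

def pvDictB (ps : List (String × Int)) : PySem.Dict String (List Int) :=
  ps.foldl (fun d p => d.modify p.1 [] (fun nums => nums ++ [p.2])) PySem.Dict.empty

theorem pvStepA_contains (d : PySem.Dict String (PySem.Set Int)) (file : String) (lineno : Int)
    (f : String) : (pvStepA d file lineno).contains f = (f == file || d.contains f) := by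
  unfold pvStepA
  by_cases h : d.contains file = true <;>
    simp [h, PySem.Dict.contains_modify, PySem.Dict.contains_insert]

theorem pvStepA_getD (d : PySem.Dict String (PySem.Set Int)) (file : String) (lineno : Int)
    (f : String) : (pvStepA d file lineno).getD f PySem.Set.empty =
      if f = file then PySem.Set.add (d.getD f PySem.Set.empty) lineno
      else d.getD f PySem.Set.empty := by
  unfold pvStepA
  by_cases hf : f = file
  · subst hf
    by_cases h : d.contains f = true
    · simp [h, PySem.Dict.getD_modify_self]
    · simp only [Bool.not_eq_true] at h
      rw [PySem.Dict.getD_of_not_contains d PySem.Set.empty h]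
      simp [h, PySem.Dict.getD_modify_self, PySem.Dict.getD_insert_self]
  · by_cases h : d.contains file = true <;>
      simp [h, hf, PySem.Dict.getD_modify_of_ne _ _ _ hf,
        PySem.Dict.getD_insert_of_ne _ _ _ hf]

theorem pvDictA_contains (ps : List (String × Int)) (f : String) :
    (pvDictA ps).contains f = ps.any (fun p => f == p.1) := by
  suffices h : ∀ d, (ps.foldl (fun d p => pvStepA d p.1 p.2) d).contains f
      = (d.contains f || ps.any (fun p => f == p.1)) by
    simpa [pvDictA] using h PySem.Dict.empty
  induction ps with
  | nil => simp
  | cons p rest ih =>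
    intro d
    simp only [List.foldl_cons, ih, pvStepA_contains, List.any_cons]
    cases d.contains f <;> cases (f == p.1) <;> simp

theorem pvDictB_contains (ps : List (String × Int)) (f : String) :
    (pvDictB ps).contains f = ps.any (fun p => f == p.1) := by
  suffices h : ∀ d : PySem.Dict String (List Int),
      (ps.foldl (fun d p => d.modify p.1 [] (fun nums => nums ++ [p.2])) d).contains f
      = (d.contains f || ps.any (fun p => f == p.1)) by
    simpa [pvDictB] using h PySem.Dict.empty
  induction ps with
  | nil => simp
  | cons p rest ih =>
    intro d
    simp only [List.foldl_cons, ih, PySem.Dict.contains_modify, List.any_cons]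
    cases d.contains f <;> cases (f == p.1) <;> simp

theorem pvDictA_mem (ps : List (String × Int)) (f : String) (x : Int) :
    x ∈ (pvDictA ps).getD f PySem.Set.empty ↔ (f, x) ∈ ps := by
  suffices h : ∀ d, (x ∈ (ps.foldl (fun d p => pvStepA d p.1 p.2) d).getD f PySem.Set.empty
      ↔ x ∈ d.getD f PySem.Set.empty ∨ (f, x) ∈ ps) by
    simpa [pvDictA, PySem.Set.empty] using h PySem.Dict.empty
  induction ps with
  | nil => simp
  | cons p rest ih =>
    intro d
    simp only [List.foldl_cons, ih, pvStepA_getD, List.mem_cons]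
    by_cases hf : f = p.1
    · subst hf
      simp [PySem.Set.mem_add, Prod.ext_iff]
      tauto
    · simp [hf, Prod.ext_iff]

theorem pvDictB_mem (ps : List (String × Int)) (f : String) (x : Int) :
    x ∈ (pvDictB ps).getD f [] ↔ (f, x) ∈ ps := by
  unfold pvDictB
  rw [PySem.Dict.getD_foldl_modify_append]
  simp only [PySem.Dict.getD_empty, List.nil_append, List.mem_map, List.mem_filter]
  constructor
  · rintro ⟨⟨a, b⟩, ⟨hmem, hab⟩, rfl⟩
    simp only [beq_iff_eq] at hab
    subst hab; exact hmem
  · intro h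
    exact ⟨(f, x), ⟨h, by simp⟩, rfl⟩

theorem pv_get?_mapValues {ν ν' : Type} (g : ν → ν') (l : List (String × ν)) (f : String) :
    (PySem.Dict.mk (l.map (fun p => (p.1, g p.2)))).get? f = ((PySem.Dict.mk l).get? f).map g := by
  induction l with
  | nil => rfl
  | cons p rest ih =>
    obtain ⟨k, v⟩ := p
    simp only [List.map_cons, PySem.Dict.get?_mk_cons]
    by_cases h : (k == f) = true <;> simp [h, ih]

theorem pvBisectLeftGo_spec (nums : List Int) (x : Int) (hp : nums.Pairwise (· ≤ ·)) :
    ∀ (n lo hi : Nat), hi - lo = n → lo ≤ hi → hi ≤ nums.length →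
    (∀ j (hj : j < nums.length), j < lo → nums[j] < x) →
    (∀ j (hj : j < nums.length), hi ≤ j → x ≤ nums[j]) →
    (∀ j (hj : j < nums.length), j < pvBisectLeftGo nums x lo hi → nums[j] < x) ∧
    (∀ j (hj : j < nums.length), pvBisectLeftGo nums x lo hi ≤ j → x ≤ nums[j]) ∧
    pvBisectLeftGo nums x lo hi ≤ nums.length := by
  have hmono : ∀ (i j : Nat) (hi : i < nums.length) (hj : j < nums.length), i ≤ j →
      nums[i] ≤ nums[j] := by
    intro i j hi hj hij
    rcases Nat.lt_or_ge i j with h | h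
    · exact (List.pairwise_iff_getElem.mp hp) i j hi hj h
    · have : i = j := le_antisymm hij h
      subst this; exact le_refl _
  intro n
  induction n using Nat.strong_induction_on with
  | _ n ih =>
    intro lo hi hn hlh hhi hlow hhigh
    rw [pvBisectLeftGo]
    by_cases h : lo < hi
    · simp only [dif_pos h]
      have hmidlt : (lo + hi) / 2 < hi := by omega
      have hmidge : lo ≤ (lo + hi) / 2 := by omega
      have hmlen : (lo + hi) / 2 < nums.length := lt_of_lt_of_le hmidlt hhi
      rw [List.getD_eq_getElem nums 0 hmlen]
      by_cases hcmp : nums[(lo + hi) / 2] < x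
      · simp only [if_pos hcmp]
        refine ih (hi - ((lo + hi) / 2 + 1)) (by omega) _ _ rfl (by omega) hhi ?_ hhigh
        intro j hj hjlt
        rcases Nat.lt_or_ge j ((lo + hi) / 2) with hj2 | hj2
        · exact lt_of_le_of_lt (hmono j _ hj hmlen (le_of_lt hj2)) hcmp
        · have : j = (lo + hi) / 2 := by omega
          subst this; exact hcmp
      · simp only [if_neg hcmp]
        refine ih ((lo + hi) / 2 - lo) (by omega) _ _ rfl (by omega) (le_of_lt hmlen |>.trans (le_refl _)) hlow ?_
        intro j hj hj2
        exact le_trans (not_lt.mp hcmp) (hmono _ j hmlen hj hj2)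
    · simp only [dif_neg h]
      have : lo = hi := by omega
      exact ⟨fun j hj hjlt => hlow j hj hjlt,
             fun j hj hle => hhigh j hj (by omega),
             by omega⟩

theorem pvBisect_window (nums : List Int) (n : Int) (hp : nums.Pairwise (· ≤ ·)) :
    (pvBisectLeft nums (n - 20) < nums.length ∧
      nums.getD (pvBisectLeft nums (n - 20)) 0 ≤ n + 20)
    ↔ ∃ x ∈ nums, (x - n).natAbs ≤ 20 := by
  obtain ⟨hlow, hhigh, hle⟩ :=
    pvBisectLeftGo_spec nums (n - 20) hp nums.length 0 nums.length rfl (Nat.zero_le _)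
      (le_refl _) (by intro j hj hj0; omega) (by intro j hj hj2; omega)
  unfold pvBisectLeft
  set i := pvBisectLeftGo nums (n - 20) 0 nums.length with hi
  constructor
  · rintro ⟨hilen, hub⟩
    rw [List.getD_eq_getElem nums 0 hilen] at hub
    have hlb := hhigh i hilen (le_refl i)
    exact ⟨nums[i], List.getElem_mem hilen, by omega⟩
  · rintro ⟨x, hx, habs⟩
    obtain ⟨j, hj, rfl⟩ := List.mem_iff_getElem.mp hx
    have hjlb : n - 20 ≤ nums[j] := by omega
    have hij : i ≤ j := by
      by_contra hc
      exact absurd hjlb (not_le.mpr (hlow j hj (not_le.mp hc)))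
    have hilen : i < nums.length := lt_of_le_of_lt hij hj
    refine ⟨hilen, ?_⟩
    rw [List.getD_eq_getElem nums 0 hilen]
    have : nums[i] ≤ nums[j] := by
      rcases Nat.lt_or_ge i j with hlt | hge
      · exact (List.pairwise_iff_getElem.mp hp) i j hilen hj hlt
      · have : i = j := by omega
        subst this; exact le_refl _
    omega

theorem pv_cond_eq (ps : List (String × Int)) (f : String) (nval : Int) (count : Int) :
    (match (pvDictA ps).get? f with
     | some s => if s.any (fun fn => decide ((fn - nval).natAbs ≤ 20)) then count + 1 else count
     | none => count)
    = (match (PySem.Dict.mk ((pvDictB ps).items.map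
          (fun p => (p.1, PySem.List.sorted p.2 (fun x => x) false)))).get? f with
       | none => count
       | some nums =>
         let i := pvBisectLeft nums (nval - 20)
         if i < nums.length ∧ nums.getD i 0 ≤ nval + 20 then count + 1 else count) := by
  rw [pv_get?_mapValues (fun v => PySem.List.sorted v (fun x => x) false) (pvDictB ps).items f]
  have hcont : (pvDictA ps).contains f = (pvDictB ps).contains f := by
    rw [pvDictA_contains, pvDictB_contains]
  cases hA : (pvDictA ps).get? f with
  | none =>
    have : (pvDictB ps).get? f = none := by
      rw [PySem.Dict.get?_eq_none_iff_contains] at hA ⊢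
      rw [← hcont]; exact hA
    rw [this]
    rfl
  | some s =>
    cases hB : (pvDictB ps).get? f with
    | none =>
      rw [PySem.Dict.get?_eq_none_iff_contains] at hB
      rw [← hcont] at hB
      rw [(PySem.Dict.get?_eq_none_iff_contains _ _).mpr hB] at hA
      exact absurd hA (by simp)
    | some lB =>
      simp only [Option.map_some]
      have hsmem : ∀ x : Int, x ∈ s ↔ (f, x) ∈ ps := by
        intro x
        rw [← pvDictA_mem ps f x, PySem.Dict.getD_eq_get?_getD, hA]
        rfl
      have hlmem : ∀ x : Int, x ∈ lB ↔ (f, x) ∈ ps := by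
        intro x
        rw [← pvDictB_mem ps f x, PySem.Dict.getD_eq_get?_getD, hB]
        rfl
      have hiff : (s.any (fun fn => decide ((fn - nval).natAbs ≤ 20)) = true)
          ↔ (pvBisectLeft (PySem.List.sorted lB (fun x => x) false) (nval - 20)
               < (PySem.List.sorted lB (fun x => x) false).length ∧
             (PySem.List.sorted lB (fun x => x) false).getD
               (pvBisectLeft (PySem.List.sorted lB (fun x => x) false) (nval - 20)) 0
               ≤ nval + 20) := by
        rw [pvBisect_window _ nval (PySem.List.sorted_pairwise lB (fun x => x))]
        simp only [List.any_eq_true, decide_eq_true_eq]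
        constructor
        · rintro ⟨x, hx, h20⟩
          exact ⟨x, ((PySem.List.sorted_perm lB (fun x => x) false).mem_iff).mpr
            ((hlmem x).mpr ((hsmem x).mp hx)), h20⟩
        · rintro ⟨x, hx, h20⟩
          exact ⟨x, (hsmem x).mpr ((hlmem x).mp
            (((PySem.List.sorted_perm lB (fun x => x) false).mem_iff).mp hx)), h20⟩
      exact if_congr hiff rfl rfl

theorem pv_ports_eq (ground_truth_lines : List String) (found_lines : List String) :
    count_line_inclusions ground_truth_lines found_lines
      = count_line_inclusions_alt ground_truth_lines found_lines := by
  unfold count_line_inclusions count_line_inclusions_alt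
  rw [pv_fold_parse, pv_fold_parse, pv_fold_parse', pv_fold_parse']
  apply PySem.List.foldl_congr_mem
  intro count q _
  exact pv_cond_eq (found_lines.filterMap pvParse) q.1 q.2 count

-- ===== VERDICT (by name: the statement is the Claim_ definition above) =====
theorem count_line_inclusions_spec : Claim_equal_count_line_inclusions := by
  intro ground_truth_lines found_lines _ _
  exact pv_ports_eq ground_truth_lines found_lines
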